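-- pv_equiv track=rewrite | github.com/VinayShetyeOfficial/leetcode-top-150 | extras/Amazon_Problems/pack/1_Process_Messages_By_Recent_Failures.py | processMessages
-- ===== SOURCE A (Python) =====
-- def processMessages(messages):
--     """
--     Given a list of messages with '_' as day separators,
--     return the messages reordered based on the rules:
--     - Start from the most recent day
--     - For each day, process messages in order
--     - Stop at the first failure message
--     """
--
--     def isFailure(message):
--         fail_messages = ['F', 'X']
--         return message in fail_messages
--
--     result = []
--     # Join list -> string, then split on '_' to get day groups, then reverse for recent first
--     groups = ''.join(messages).split('_')[::-1]
--
--     for index, group in enumerate(groups):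
--         for message in group:
--             if isFailure(message):
--                 result.append(message)
--                 break
--             result.append(message)
--
--         # Reinsert '_' as day separator (except after last group)
--         if index < len(groups) - 1:
--             result.append('_')
--
--     return result
-- ===== SOURCE B (Python) =====
-- def processMessages(messages):
--     # One pass over the character stream: maintain the current day's kept
--     # characters and a 'failed' flag; finished days are pushed on a stack
--     # (most recent first), then flattened with '_' separators.
--     groups = []      # finished days, most recent first
--     cur = []         # kept characters of the current day
--     failed = False
--     for ch in ''.join(messages):
--         if ch == '_':
--             groups.insert(0, cur)
--             cur = []
--             failed = False
--         elif not failed: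
--             cur.append(ch)
--             failed = ch in ('F', 'X')
--     groups.insert(0, cur)
--
--     result = []
--     for i, g in enumerate(groups):
--         if i:
--             result.append('_')
--         result.extend(g)
--     return result
-- ===== Notes on version B (the rewrite author's own statement) =====
-- stated objective: alternative
-- what changed: B replaces A's split-on-'_'/reverse/per-group-truncating-loop pipeline with a single left-to-right state machine over the character stream (current-day buffer + failed flag, finished days pushed onto a stack so recency order falls out), flattened once at the end.
import Mathlib
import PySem

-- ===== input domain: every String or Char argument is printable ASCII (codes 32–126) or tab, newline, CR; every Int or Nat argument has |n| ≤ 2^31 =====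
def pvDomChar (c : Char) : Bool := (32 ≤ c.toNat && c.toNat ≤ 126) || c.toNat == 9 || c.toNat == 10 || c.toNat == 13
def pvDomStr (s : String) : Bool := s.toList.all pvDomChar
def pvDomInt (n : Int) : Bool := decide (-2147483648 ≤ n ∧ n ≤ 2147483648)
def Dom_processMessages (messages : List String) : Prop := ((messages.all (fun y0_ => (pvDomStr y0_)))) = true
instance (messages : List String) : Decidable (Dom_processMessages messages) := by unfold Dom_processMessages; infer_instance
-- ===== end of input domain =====

-- B replaces A's split/reverse/per-group pipeline with one left-to-right state
-- machine (current-day buffer + failed flag, finished days pushed onto a stack),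
-- flattened once at the end (objective: alternative algorithm, same result).

-- ===== PORT A =====
-- isFailure: membership in ['F','X']; iterating a Python str yields 1-char strings,
-- ported as the underlying Char (the membership test is exactly char equality).
def pmIsFailure (message : Char) : Bool :=
  ['F', 'X'].contains message

-- inner loop: 'for message in group: result.append(message); break on failure'
def pmInnerA : List Char → List String → List String
  | [], result => result
  | message :: rest, result =>
    if pmIsFailure message then result ++ [String.ofList [message]]
    else pmInnerA rest (result ++ [String.ofList [message]])

-- one iteration of the outer loop at enumerate index p.1 (n = len(groups))
def pmStep (n : Nat) (result : List String) (p : Int × String) : List String :=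
  let result := pmInnerA p.2.toList result
  if p.1 < (n : Int) - 1 then result ++ ["_"] else result

def processMessages (messages : List String) : List String :=
  -- split? is some here: the separator '_' is nonempty
  let groups := ((PySem.Str.split? (PySem.Str.join "" messages) "_").getD []).reverse
  (PySem.List.enumerate groups 0).foldl (pmStep groups.length) []

-- ===== PORT B =====
-- the single pass: 'for ch in "".join(messages): …' with state (cur, failed, groups);
-- 'groups.insert(0, cur)' is the cons onto groups
def pmScan : List Char → List Char → Bool → List (List Char) → List (List Char)
  | [], cur, _, groups => cur :: groups
  | ch :: rest, cur, failed, groups =>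
    if ch == '_' then pmScan rest [] false (cur :: groups)
    else if failed then pmScan rest cur failed groups
    else pmScan rest (cur ++ [ch]) (ch == 'F' || ch == 'X') groups

-- final loop: 'for i, g in enumerate(groups): if i: result.append("_"); result.extend(g)'
def pmFlatStep (result : List String) (p : Int × List Char) : List String :=
  (if p.1 ≠ 0 then result ++ ["_"] else result) ++ p.2.map (fun c => String.ofList [c])

def processMessages_alt (messages : List String) : List String :=
  let groups := pmScan (PySem.Str.join "" messages).toList [] false []
  (PySem.List.enumerate groups 0).foldl pmFlatStep []

-- ===== PRECONDITION & SPEC =====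
def Spec_processMessages (messages : List String) (out : List String) : Prop := out = processMessages_alt messages
instance (messages : List String) (out : List String) : Decidable (Spec_processMessages messages out) := by unfold Spec_processMessages; infer_instance

-- ===== CLAIM (what is proved, stated in full; the proofs are below) =====
def Claim_equal_processMessages : Prop := ∀ (messages : List String), Dom_processMessages messages → Spec_processMessages messages (processMessages messages)

-- ===== LEMMAS AND PROOFS =====

-- prefix of cs up to and including the first failure char (shared characterisation)
def pmTuf : List Char → List Char
  | [] => []
  | c :: r => if c == 'F' || c == 'X' then [c] else c :: pmTuf r

-- reference split on '_' (single separator char)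
def pmSplitU : List Char → List (List Char)
  | [] => [[]]
  | c :: r =>
    if c = '_' then [] :: pmSplitU r
    else
      match pmSplitU r with
      | g :: t => (c :: g) :: t
      | [] => [[c]]

theorem pmSplitU_ne_nil (cs : List Char) : pmSplitU cs ≠ [] := by
  cases cs with
  | nil => simp [pmSplitU]
  | cons c r =>
    by_cases h : c = '_'
    · simp [pmSplitU, h]
    · simp only [pmSplitU, h, if_false]
      cases pmSplitU r <;> simp

-- ---- A-side characterisation ----

theorem pmIsFailure_eq (c : Char) : pmIsFailure c = (c == 'F' || c == 'X') := by
  cases hF : c == 'F' <;> cases hX : c == 'X' <;> simp_all [pmIsFailure]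

theorem pmInnerA_eq (cs : List Char) : ∀ (res : List String),
    pmInnerA cs res = res ++ (pmTuf cs).map (fun c => String.ofList [c]) := by
  induction cs with
  | nil => intro res; simp [pmInnerA, pmTuf]
  | cons c r ih =>
    intro res
    rw [pmInnerA, pmIsFailure_eq]
    by_cases h : (c == 'F' || c == 'X') = true
    · simp [h, pmTuf]
    · rw [if_neg h, ih]
      simp [pmTuf, Bool.eq_false_iff.mpr (fun hc => h hc)]

-- the flat answer for a (reversed) list of groups: truncated chars, '_' between groups
def pmBody : List String → List String
  | [] => []
  | [g] => (pmTuf g.toList).map (fun c => String.ofList [c])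
  | g :: r :: t => (pmTuf g.toList).map (fun c => String.ofList [c]) ++ ["_"] ++ pmBody (r :: t)

theorem foldA_eq (n : Nat) : ∀ (gs : List String) (s : Nat) (acc : List String),
    n = s + gs.length →
    (PySem.List.enumerate gs (s : Int)).foldl (pmStep n) acc = acc ++ pmBody gs := by
  intro gs
  induction gs with
  | nil => intro s acc _; simp [PySem.List.enumerate_nil, pmBody]
  | cons g rest ih =>
    intro s acc h
    rw [PySem.List.enumerate_cons, List.foldl_cons]
    cases rest with
    | nil =>
      have hn : n = s + 1 := by simpa using h
      have hstep : pmStep n acc ((s : Int), g)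
          = acc ++ (pmTuf g.toList).map (fun c => String.ofList [c]) := by
        have hc : ¬ ((s : Int) < (n : Int) - 1) := by omega
        simp [pmStep, hc, pmInnerA_eq]
      rw [hstep]
      simp [PySem.List.enumerate_nil, pmBody]
    | cons r t =>
      have hc : ((s : Int) < (n : Int) - 1) := by
        simp [List.length_cons] at h; omega
      have hstep : pmStep n acc ((s : Int), g)
          = acc ++ (pmTuf g.toList).map (fun c => String.ofList [c]) ++ ["_"] := by
        simp [pmStep, hc, pmInnerA_eq]
      rw [hstep]
      have hs1 : (s : Int) + 1 = ((s + 1 : Nat) : Int) := by push_cast; ring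
      rw [hs1, ih (s + 1) _ (by simp at h ⊢; omega)]
      simp [pmBody]

-- ---- split characterisation: PySem.Chars.splitOn on a 1-char sep is pmSplitU ----

theorem splitOn_go_eq (cs : List Char) : ∀ (fuel : Nat) (cur : List Char)
    (acc : List (List Char)), cs.length ≤ fuel →
    PySem.Chars.splitOn.go ['_'] fuel cs cur acc
      = acc.reverse ++
        (match pmSplitU cs with
         | g :: t => (cur.reverse ++ g) :: t
         | [] => []) := by
  induction cs with
  | nil =>
    intro fuel cur acc _
    cases fuel <;> simp [PySem.Chars.splitOn.go, pmSplitU]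
  | cons c r ih =>
    intro fuel cur acc h
    cases fuel with
    | zero => simp at h
    | succ f =>
      by_cases hc : c = '_'
      · subst hc
        have hpre : List.isPrefixOf ['_'] ('_' :: r) = true := by
          simp [List.isPrefixOf]
        rw [PySem.Chars.splitOn.go, if_pos hpre]
        have := ih f [] (cur.reverse :: acc) (by simp at h ⊢; omega)
        simp only [List.length_nil, List.length_cons, Nat.zero_add, List.drop_succ_cons,
          List.drop_zero] at this ⊢
        rw [this]
        rcases hsp : pmSplitU r with _ | ⟨g, t⟩
        · exact absurd hsp (pmSplitU_ne_nil r)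
        · simp [pmSplitU, hsp]
      · have hpre : List.isPrefixOf ['_'] (c :: r) = false := by
          simp [List.isPrefixOf]
          exact fun hx => hc hx.symm
        rw [PySem.Chars.splitOn.go, if_neg (by simp [hpre])]
        have := ih f (c :: cur) acc (by simp at h ⊢; omega)
        rw [this]
        rcases hsp : pmSplitU r with _ | ⟨g, t⟩
        · exact absurd hsp (pmSplitU_ne_nil r)
        · simp [pmSplitU, hc, hsp]

theorem splitOn_eq_pmSplitU (cs : List Char) :
    PySem.Chars.splitOn cs ['_'] = pmSplitU cs := by
  rw [PySem.Chars.splitOn, splitOn_go_eq cs (cs.length + 1) [] [] (by omega)]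
  rcases hsp : pmSplitU cs with _ | ⟨g, t⟩
  · exact absurd hsp (pmSplitU_ne_nil cs)
  · simp

-- ---- B-side characterisation ----

-- the scan produces the (first-group-merged) truncated groups, reversed, on top of `groups`
def pmFirst (cur : List Char) (failed : Bool) : List (List Char) → List (List Char)
  | [] => []
  | g :: t => (cur ++ (if failed then [] else pmTuf g)) :: t.map pmTuf

theorem pmScan_eq (cs : List Char) : ∀ (cur : List Char) (failed : Bool)
    (groups : List (List Char)),
    pmScan cs cur failed groups
      = (pmFirst cur failed (pmSplitU cs)).reverse ++ groups := by
  induction cs with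
  | nil => intro cur failed groups; cases failed <;> simp [pmScan, pmSplitU, pmFirst, pmTuf]
  | cons c r ih =>
    intro cur failed groups
    by_cases hc : c = '_'
    · subst hc
      rw [pmScan, if_pos (by decide)]
      rw [ih [] false (cur :: groups)]
      rcases hsp : pmSplitU r with _ | ⟨g, t⟩
      · exact absurd hsp (pmSplitU_ne_nil r)
      · cases failed <;> simp [pmSplitU, hsp, pmFirst, pmTuf]
    · have hne : (c == '_') = false := by simpa using hc
      rw [pmScan, if_neg (by simp [hne])]
      cases failed with
      | true =>
        rw [if_pos rfl, ih cur true groups]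
        rcases hsp : pmSplitU r with _ | ⟨g, t⟩
        · exact absurd hsp (pmSplitU_ne_nil r)
        · simp [pmSplitU, hc, hsp, pmFirst]
      | false =>
        rw [if_neg (by simp), ih (cur ++ [c]) (c == 'F' || c == 'X') groups]
        rcases hsp : pmSplitU r with _ | ⟨g, t⟩
        · exact absurd hsp (pmSplitU_ne_nil r)
        · by_cases hfx : (c == 'F' || c == 'X') = true
          · simp [pmSplitU, hc, hsp, pmFirst, pmTuf, hfx]
          · simp only [Bool.not_eq_true] at hfx
            simp [pmSplitU, hc, hsp, pmFirst, pmTuf, hfx]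

-- the flatten fold, tail part (indices ≥ 1)
theorem foldFlat_tail (gs : List (List Char)) : ∀ (s : Nat) (acc : List String),
    1 ≤ s →
    (PySem.List.enumerate gs (s : Int)).foldl pmFlatStep acc
      = acc ++ gs.flatMap (fun g => "_" :: g.map (fun c => String.ofList [c])) := by
  induction gs with
  | nil => intro s acc _; simp [PySem.List.enumerate_nil]
  | cons g rest ih =>
    intro s acc hs
    rw [PySem.List.enumerate_cons, List.foldl_cons]
    have hstep : pmFlatStep acc ((s : Int), g)
        = acc ++ ["_"] ++ g.map (fun c => String.ofList [c]) := by
      have hns : s ≠ 0 := by omega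
      simp [pmFlatStep, hns]
    rw [hstep]
    have hs1 : (s : Int) + 1 = ((s + 1 : Nat) : Int) := by push_cast; ring
    rw [hs1, ih (s + 1) _ (by omega)]
    simp

theorem foldFlat_eq (g : List Char) (rest : List (List Char)) :
    (PySem.List.enumerate (g :: rest) 0).foldl pmFlatStep []
      = g.map (fun c => String.ofList [c])
        ++ rest.flatMap (fun g => "_" :: g.map (fun c => String.ofList [c])) := by
  rw [PySem.List.enumerate_cons, List.foldl_cons]
  have hstep : pmFlatStep [] ((0 : Int), g) = g.map (fun c => String.ofList [c]) := by
    simp [pmFlatStep]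
  rw [hstep]
  have h01 : (0 : Int) + 1 = ((1 : Nat) : Int) := by norm_num
  rw [h01, foldFlat_tail rest 1 _ (by omega)]

-- pmBody in flatMap form
theorem pmBody_eq_flatMap (g : String) : ∀ (rest : List String),
    pmBody (g :: rest)
      = (pmTuf g.toList).map (fun c => String.ofList [c])
        ++ rest.flatMap (fun r => "_" :: (pmTuf r.toList).map (fun c => String.ofList [c])) := by
  intro rest
  induction rest generalizing g with
  | nil => simp [pmBody]
  | cons r t ih => rw [pmBody]; simp [ih r]

-- toList ∘ ofList = id on char lists
theorem toList_ofList (l : List Char) : (String.ofList l).toList = l := by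
  simp

theorem flat_eq_body (hs : List (List Char)) (g : List Char) :
    (PySem.List.enumerate (pmTuf g :: hs.map pmTuf) 0).foldl pmFlatStep []
      = pmBody ((g :: hs).map String.ofList) := by
  rw [foldFlat_eq, List.map_cons, pmBody_eq_flatMap, toList_ofList]
  congr 1
  induction hs with
  | nil => simp
  | cons x xs ih => simp [ih]

-- ===== VERDICT (by name: the statement is the Claim_ definition above) =====
theorem processMessages_spec : Claim_equal_processMessages := by
  intro messages _
  unfold Spec_processMessages processMessages processMessages_alt
  dsimp only
  -- reduce A's split? to pmSplitU
  have hsplit : (PySem.Str.split? (PySem.Str.join "" messages) "_").getD []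
      = (pmSplitU (PySem.Str.join "" messages).toList).map String.ofList := by
    rw [PySem.Str.split?]
    have : PySem.Chars.split? (PySem.Str.join "" messages).toList "_".toList
        = some (pmSplitU (PySem.Str.join "" messages).toList) := by
      rw [PySem.Chars.split?]
      simp [splitOn_eq_pmSplitU]
    rw [this]
    simp
  rw [hsplit]
  set cs := (PySem.Str.join "" messages).toList with hcs
  rw [pmScan_eq cs [] false []]
  rcases hsp : pmSplitU cs with _ | ⟨g, t⟩
  · exact absurd hsp (pmSplitU_ne_nil cs)
  · rw [List.append_nil]
    have h0 : ((0 : Nat) : Int) = (0 : Int) := rfl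
    conv_lhs => rw [← h0]
    rw [foldA_eq ((List.map String.ofList (g :: t)).reverse.length)
          ((List.map String.ofList (g :: t)).reverse) 0 [] (by simp),
        List.nil_append]
    have hfirst : pmFirst [] false (g :: t) = pmTuf g :: t.map pmTuf := by
      simp [pmFirst]
    rw [hfirst]
    rcases List.eq_nil_or_concat t with ht | ⟨t', a, hta⟩
    · subst ht
      simpa using (flat_eq_body [] g).symm
    · subst hta
      simp only [List.concat_eq_append]
      have hrev : (pmTuf g :: (t' ++ [a]).map pmTuf).reverse
          = pmTuf a :: ((g :: t').reverse.map pmTuf) := by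
        simp
      have hrev2 : ((List.map String.ofList (g :: (t' ++ [a]))).reverse)
          = (a :: (g :: t').reverse).map String.ofList := by
        simp
      rw [hrev, hrev2]
      have := flat_eq_body ((g :: t').reverse) a
      simp only [List.map_reverse] at this ⊢
      exact this.symm
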